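-- pv_equiv track=rewrite | github.com/OskarBjork/kattis | kattis/medium/alien_numbers.py | find_earth_value_from_language
-- ===== SOURCE A (Python) =====
-- def find_earth_value_from_language(alien_number, alien_language):
--     earth_language = "0123456789"
--
--     base_in_alien_language = len(alien_language)
--
--     value_in_earth_numbers = 0
--     for i, char in enumerate(alien_number[::-1]):
--         value_in_earth_numbers += (
--             alien_language.index(char) * base_in_alien_language**i
--         )
--
--     return value_in_earth_numbers
-- ===== SOURCE B (Python) =====
-- def find_earth_value_from_language(alien_number, alien_language):
--     digit_value = {}
--     for i, ch in enumerate(alien_language):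
--         if ch not in digit_value:
--             digit_value[ch] = i
--     base = len(alien_language)
--     value = 0
--     for ch in alien_number:
--         value = value * base + digit_value[ch]
--     return value
-- ===== Notes on version B (the rewrite author's own statement) =====
-- stated objective: faster
-- what changed: Replaces the reversed-enumerate loop that calls alien_language.index and recomputes base**i for every digit with Horner's method over the string left-to-right, using a digit-value dictionary built once (first occurrence wins, matching .index).
import Mathlib
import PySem

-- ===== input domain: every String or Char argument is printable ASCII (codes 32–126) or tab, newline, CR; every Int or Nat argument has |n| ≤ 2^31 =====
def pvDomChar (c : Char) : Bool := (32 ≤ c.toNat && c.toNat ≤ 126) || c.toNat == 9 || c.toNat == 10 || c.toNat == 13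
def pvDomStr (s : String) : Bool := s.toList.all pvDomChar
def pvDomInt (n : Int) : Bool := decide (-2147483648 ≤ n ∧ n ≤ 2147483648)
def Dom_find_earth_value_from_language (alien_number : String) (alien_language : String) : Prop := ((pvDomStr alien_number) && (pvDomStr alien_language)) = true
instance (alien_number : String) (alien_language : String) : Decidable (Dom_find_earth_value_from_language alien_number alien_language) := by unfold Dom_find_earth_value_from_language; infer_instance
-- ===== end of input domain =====

-- B replaces the per-digit alien_language.index scan and base**i recomputation of A
-- by Horner's method with a digit-value dictionary built once (first occurrence wins): faster.


-- ===== PORT A =====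
-- literal port: enumerate over alien_number[::-1]; alien_language.index(char) is
-- PySem.List.index? (none = ValueError, excluded by Pre_; .getD 0 only guards totality)
def find_earth_value_from_language (alien_number : String) (alien_language : String) : Int :=
  let base_in_alien_language : Int := ((alien_language.toList.length : Nat) : Int)
  let rev := (PySem.List.slice? alien_number.toList none none (-1)).getD []
  (PySem.List.enumerate rev 0).foldl
    (fun acc p =>
      acc + (((PySem.List.index? alien_language.toList p.2).getD 0 : Nat) : Int)
            * base_in_alien_language ^ p.1.toNat)
    0

-- ===== PORT B =====
-- literal port of Source B: build digit_value dict (skip already-present keys), then Horner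
-- (digit_value[ch] raises KeyError on a missing char — excluded by Pre_; .getD 0 guards totality)
def find_earth_value_from_language_alt (alien_number : String) (alien_language : String) : Int :=
  let digit_value :=
    (PySem.List.enumerate alien_language.toList 0).foldl
      (fun d p => if d.contains p.2 then d else d.insert p.2 p.1)
      (PySem.Dict.empty : PySem.Dict Char Int)
  let base : Int := ((alien_language.toList.length : Nat) : Int)
  alien_number.toList.foldl (fun acc c => acc * base + digit_value.getD c 0) 0

-- ===== PRECONDITION & SPEC =====
-- Pre_ excludes exactly the inputs where Python A raises ValueError (a digit of
-- alien_number not occurring in alien_language); B raises KeyError there too.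
def Pre_find_earth_value_from_language (alien_number : String) (alien_language : String) : Prop :=
  alien_number.toList.all (fun c => alien_language.toList.contains c) = true
instance (alien_number : String) (alien_language : String) : Decidable (Pre_find_earth_value_from_language alien_number alien_language) := by unfold Pre_find_earth_value_from_language; infer_instance
def pvWitness_find_earth_value_from_language : String × String := ("ba", "ab")
def Spec_find_earth_value_from_language (alien_number : String) (alien_language : String) (out : Int) : Prop := out = find_earth_value_from_language_alt alien_number alien_language
instance (alien_number : String) (alien_language : String) (out : Int) : Decidable (Spec_find_earth_value_from_language alien_number alien_language out) := by unfold Spec_find_earth_value_from_language; infer_instance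

-- ===== CLAIM (what is proved, stated in full; the proofs are below) =====
def Claim_equal_find_earth_value_from_language : Prop := ∀ (alien_number : String) (alien_language : String), Dom_find_earth_value_from_language alien_number alien_language → Pre_find_earth_value_from_language alien_number alien_language → Spec_find_earth_value_from_language alien_number alien_language (find_earth_value_from_language alien_number alien_language)

-- ===== LEMMAS AND PROOFS =====

-- value of a digit: first-occurrence index in the language, 0 when absent
def pvDigitVal (lang : List Char) (c : Char) : Int :=
  (((PySem.List.index? lang c).getD 0 : Nat) : Int)

-- the dict built by B's first loop looks up exactly pvDigitVal
theorem pv_dict_getD (l : List Char) : ∀ (s : Int) (d : PySem.Dict Char Int) (c : Char),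
    ((PySem.List.enumerate l s).foldl
      (fun d p => if d.contains p.2 then d else d.insert p.2 p.1) d).getD c 0
    = if d.contains c then d.getD c 0
      else match PySem.List.index? l c with
           | some k => s + (k : Int)
           | none => 0 := by
  induction l with
  | nil =>
    intro s d c
    simp only [PySem.List.enumerate_nil, List.foldl_nil, PySem.List.index?_eq_idxOf?,
      List.idxOf?_nil]
    split_ifs with h
    · rfl
    · exact PySem.Dict.getD_of_not_contains d 0 (by simpa using h)
  | cons x t ih =>
    intro s d c
    rw [PySem.List.enumerate_cons, List.foldl_cons, ih]
    by_cases hcx : c = x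
    · subst hcx
      rw [PySem.List.index?_cons_self]
      by_cases hd : d.contains c
      · simp [hd]
      · have hd' : d.contains c = false := by simpa using hd
        simp [hd', PySem.Dict.getD_insert_self]
    · have hx : x ≠ c := fun h => hcx h.symm
      rw [PySem.List.index?_cons_of_ne t hx]
      cases hdx : d.contains x with
      | true =>
        simp only [if_true]
        by_cases hd : d.contains c
        · simp [hd]
        · simp only [hd, Bool.false_eq_true, if_false]
          cases hidx : PySem.List.index? t c with
          | none => simp
          | some k => simp; ring
      | false =>
        simp only [Bool.false_eq_true, if_false]
        have hcont : (d.insert x s).contains c = d.contains c := by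
          simp [PySem.Dict.contains_insert, hcx]
        rw [hcont, PySem.Dict.getD_insert_of_ne d s 0 hcx]
        by_cases hd : d.contains c
        · simp [hd]
        · simp only [hd, Bool.false_eq_true, if_false]
          cases hidx : PySem.List.index? t c with
          | none => simp
          | some k => simp; ring

-- Horner fold with arbitrary initial accumulator
theorem pv_horner_shift (b : Int) (f : Char → Int) : ∀ (l : List Char) (a : Int),
    l.foldl (fun acc c => acc * b + f c) a
    = a * b ^ l.length + l.foldl (fun acc c => acc * b + f c) 0 := by
  intro l
  induction l with
  | nil => intro a; simp
  | cons c t ih =>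
    intro a
    simp only [List.foldl_cons, List.length_cons]
    rw [ih (a * b + f c), ih (0 * b + f c)]
    ring

-- the reversed positional sum is the forward Horner fold
theorem pv_sum_rev (b : Int) (f : Char → Int) : ∀ (l : List Char),
    (PySem.List.enumerate l.reverse 0).foldl
      (fun acc p => acc + f p.2 * b ^ p.1.toNat) 0
    = l.foldl (fun acc c => acc * b + f c) 0 := by
  intro l
  induction l with
  | nil => simp [PySem.List.enumerate_nil]
  | cons c t ih =>
    rw [List.reverse_cons, PySem.List.enumerate_append, List.foldl_append, ih]
    simp only [PySem.List.enumerate_cons, PySem.List.enumerate_nil, List.foldl_cons,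
      List.foldl_nil, List.length_reverse, List.foldl_cons]
    rw [pv_horner_shift b f t (0 * b + f c)]
    simp [Int.toNat_natCast]
    ring

-- ===== VERDICT (by name: the statement is the Claim_ definition above) =====
theorem find_earth_value_from_language_spec : Claim_equal_find_earth_value_from_language := by
  intro alien_number alien_language _ _
  unfold Spec_find_earth_value_from_language
  unfold find_earth_value_from_language find_earth_value_from_language_alt
  rw [PySem.List.slice?_none_none_neg_one]
  simp only [Option.getD_some]
  rw [pv_sum_rev ((alien_language.toList.length : Nat) : Int)
        (fun c => (((PySem.List.index? alien_language.toList c).getD 0 : Nat) : Int))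
        alien_number.toList]
  apply PySem.List.foldl_congr_mem
  intro acc x _
  have h := pv_dict_getD alien_language.toList 0 (PySem.Dict.empty : PySem.Dict Char Int) x
  rw [h]
  simp only [PySem.Dict.contains_empty, Bool.false_eq_true, if_false]
  cases hidx : PySem.List.index? alien_language.toList x with
  | none => simp
  | some k => simp
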